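-- pv_equiv track=rewrite | github.com/Sasimowskaz/GameCiasneBlizniaki | CiasneBlizniaki.py | is_twin
-- ===== SOURCE A (Python) =====
-- import copy
-- from collections import Counter
--
-- def is_twin(x):
--     y = copy.deepcopy(x)
--     if sum(list(map(lambda x: x % 2, list(Counter(y).values())))):
--         return False
--     c = list(map(lambda x: x // 2, list(Counter(y).values())))
--     list1 = []
--     list2 = []
--     for el in y:
--         ind = list(Counter(y).keys()).index(el)
--         if c[ind] != 0:
--             c[ind] = c[ind] - 1
--             list1.append(el)
--         else:
--             list2.append(el)
--     return list1 == list2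
-- ===== SOURCE B (Python) =====
-- def is_twin(x):
--     pos = {}
--     for i, v in enumerate(x):
--         pos.setdefault(v, []).append(i)
--     if any(len(p) % 2 for p in pos.values()):
--         return False
--     firsts = sorted(i for p in pos.values() for i in p[:len(p) // 2])
--     seconds = sorted(i for p in pos.values() for i in p[len(p) // 2:])
--     return all(x[i] == x[j] for i, j in zip(firsts, seconds))
-- ===== Notes on version B (the rewrite author's own statement) =====
-- stated objective: faster
-- what changed: A streams through the list greedily routing each element into list1 or list2 via a repeatedly rebuilt Counter and list.index, then compares the two lists; B instead groups the positions of each value once in a dict, slices each position list into its first and second half, sorts the two pooled position sets, and compares the values at paired positions.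
import Mathlib
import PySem

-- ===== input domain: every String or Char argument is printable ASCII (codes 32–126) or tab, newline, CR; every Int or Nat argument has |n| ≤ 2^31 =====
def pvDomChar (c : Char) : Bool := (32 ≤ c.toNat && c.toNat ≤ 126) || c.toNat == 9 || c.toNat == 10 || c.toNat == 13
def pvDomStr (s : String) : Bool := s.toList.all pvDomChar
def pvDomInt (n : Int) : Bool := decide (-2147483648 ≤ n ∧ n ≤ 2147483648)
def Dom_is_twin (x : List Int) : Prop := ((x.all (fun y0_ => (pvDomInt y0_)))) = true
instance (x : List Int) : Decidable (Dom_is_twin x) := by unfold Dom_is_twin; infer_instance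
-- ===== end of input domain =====

-- B replaces A's quadratic greedy split (Counter rebuilt + list.index inside the loop) by
-- grouping each value's positions once, sorting the pooled first-half and second-half
-- position sets, and comparing values at paired positions (objective: faster).

-- ===== PORT A =====
def is_twin (x : List Int) : Bool :=
  let y := x
  if ((PySem.Dict.counter y).values.map (fun v => PySem.Int.mod v 2)).sum ≠ 0 then false
  else
    let c0 := (PySem.Dict.counter y).values.map (fun v => PySem.Int.floordiv v 2)
    let st := y.foldl
      (fun (st : List Int × List Int × List Int) el =>
        let ind := (PySem.List.index? (PySem.Dict.counter y).keys el).getD 0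
        if st.1.getD ind 0 ≠ 0 then
          (st.1.set ind (st.1.getD ind 0 - 1), st.2.1 ++ [el], st.2.2)
        else
          (st.1, st.2.1, st.2.2 ++ [el]))
      (c0, ([] : List Int), ([] : List Int))
    st.2.1 == st.2.2

-- ===== PORT B =====
-- Source B: group positions per value, split each position list in half, sort the pools,
-- compare values at paired positions.  x[i] is PySem.List.pyGet? (exact: in-range here).
def is_twin_alt (x : List Int) : Bool :=
  let pos := (PySem.List.enumerate x).foldl
      (fun (d : PySem.Dict Int (List Int)) p => d.modify p.2 [] (· ++ [p.1])) PySem.Dict.empty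
  if pos.values.any (fun p => PySem.Int.mod (PySem.List.len p) 2 ≠ 0) then false
  else
    let firsts := PySem.List.sorted (pos.values.flatMap
        (fun p => PySem.List.slice p none (some (PySem.Int.floordiv (PySem.List.len p) 2))))
        (fun i => i) false
    let seconds := PySem.List.sorted (pos.values.flatMap
        (fun p => PySem.List.slice p (some (PySem.Int.floordiv (PySem.List.len p) 2)) none))
        (fun i => i) false
    (firsts.zip seconds).all (fun q => PySem.List.pyGet? x q.1 == PySem.List.pyGet? x q.2)

-- ===== PRECONDITION & SPEC =====
def Spec_is_twin (x : List Int) (out : Bool) : Prop := out = is_twin_alt x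
instance (x : List Int) (out : Bool) : Decidable (Spec_is_twin x out) := by unfold Spec_is_twin; infer_instance

-- ===== CLAIM (what is proved, stated in full; the proofs are below) =====
def Claim_equal_is_twin : Prop := ∀ (x : List Int), Dom_is_twin x → Spec_is_twin x (is_twin x)

-- ===== LEMMAS AND PROOFS =====

-- abstract splitter: given half-counts h and seen-so-far s, which element goes to list1 / list2
def twinSplit (h : Int → Int) : (Int → Int) → List Int → List Int × List Int
  | _, [] => ([], [])
  | s, el :: r =>
    let pr := twinSplit h (fun k => if k = el then s k + 1 else s k) r
    if s el < h el then (el :: pr.1, pr.2) else (pr.1, el :: pr.2)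

lemma index_spec {keys : List Int} (hnd : keys.Nodup) {el : Int} {i : Nat}
    (h : PySem.List.index? keys el = some i) :
    ∃ (hlt : i < keys.length), keys[i] = el ∧
      ∀ j (hj : j < keys.length), keys[j] = el → j = i := by
  obtain ⟨hlt, he, _⟩ := PySem.List.getElem_of_index?_eq_some h
  exact ⟨hlt, he, fun j hj hje => (List.Nodup.getElem_inj_iff hnd).mp (hje.trans he.symm)⟩

lemma getD_map_at {keys : List Int} {el : Int} {i : Nat} (hlt : i < keys.length)
    (he : keys[i] = el) (g : Int → Int) :
    (keys.map g).getD i 0 = g el := by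
  rw [List.getD_eq_getElem?_getD, List.getElem?_map]
  simp [List.getElem?_eq_getElem hlt, he]

lemma set_map_at {keys : List Int} (hnd : keys.Nodup) {el : Int} {i : Nat}
    (hlt : i < keys.length) (he : keys[i] = el) (g : Int → Int) (w : Int) :
    (keys.map g).set i w = keys.map (fun k => if k = el then w else g k) := by
  apply List.ext_getElem (by simp)
  intro j h1 h2
  simp only [List.getElem_set, List.getElem_map]
  by_cases hij : i = j
  · subst hij; simp [he]
  · have hlen : j < keys.length := by simpa using h2
    have : keys[j] ≠ el := by
      intro hc
      exact hij ((List.Nodup.getElem_inj_iff hnd).mp (hc.trans he.symm)).symm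
    simp [hij, this]

lemma foldA (keys : List Int) (hnd : keys.Nodup) (h : Int → Int) :
    ∀ (rest : List Int) (s : Int → Int) (l1 l2 : List Int),
    (∀ el ∈ rest, el ∈ keys) →
    List.foldl
      (fun (st : List Int × List Int × List Int) el =>
        let ind := (PySem.List.index? keys el).getD 0
        if st.1.getD ind 0 ≠ 0 then
          (st.1.set ind (st.1.getD ind 0 - 1), st.2.1 ++ [el], st.2.2)
        else
          (st.1, st.2.1, st.2.2 ++ [el]))
      (keys.map (fun k => h k - min (s k) (h k)), l1, l2) rest
    = (keys.map (fun k => h k - min (s k + rest.count k) (h k)),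
       l1 ++ (twinSplit h s rest).1, l2 ++ (twinSplit h s rest).2) := by
  intro rest
  induction rest with
  | nil => intro s l1 l2 _; simp [twinSplit]
  | cons el r ih =>
    intro s l1 l2 hmem
    have helk : el ∈ keys := hmem el List.mem_cons_self
    obtain ⟨i, hi⟩ : ∃ i, PySem.List.index? keys el = some i :=
      Option.isSome_iff_exists.mp ((PySem.List.index?_isSome_iff keys el).mpr helk)
    obtain ⟨hlt, he, huniq⟩ := index_spec hnd hi
    have hmem' : ∀ e ∈ r, e ∈ keys := fun e hr => hmem e (List.mem_cons_of_mem _ hr)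
    simp only [List.foldl_cons, hi, Option.getD_some,
      getD_map_at hlt he (fun k => h k - min (s k) (h k))]
    by_cases hcase : s el < h el
    · have hne : h el - min (s el) (h el) ≠ 0 := by
        rw [min_eq_left hcase.le]; omega
      rw [if_pos hne]
      rw [set_map_at hnd hlt he _ (h el - min (s el) (h el) - 1)]
      have hgeq : (keys.map fun k => if k = el then h el - min (s el) (h el) - 1
            else h k - min (s k) (h k))
          = keys.map (fun k => h k - min ((fun k => if k = el then s k + 1 else s k) k)
              (h k)) := by
        apply List.map_congr_left
        intro k hk
        beta_reduce
        by_cases hke : k = el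
        · subst hke
          rw [if_pos rfl, if_pos rfl, min_eq_left hcase.le, min_eq_left (by omega)]
          ring
        · rw [if_neg hke, if_neg hke]
      rw [hgeq, ih _ (l1 ++ [el]) l2 hmem']
      have hsplit : twinSplit h s (el :: r)
          = (el :: (twinSplit h (fun k => if k = el then s k + 1 else s k) r).1,
             (twinSplit h (fun k => if k = el then s k + 1 else s k) r).2) := by
        simp [twinSplit, hcase]
      rw [hsplit]
      refine congrArg₂ _ ?_ (by simp)
      apply List.map_congr_left
      intro k hk
      beta_reduce
      by_cases hke : k = el
      · subst hke
        rw [if_pos rfl, List.count_cons]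
        have : (↑(List.count k r + if (k == k) = true then 1 else 0) : Int)
            = ↑(List.count k r) + 1 := by simp
        rw [this]
        have h2 : s k + 1 + (↑(List.count k r) : Int) = s k + (↑(List.count k r) + 1) := by ring
        rw [h2]
      · rw [if_neg hke, List.count_cons]
        simp [Ne.symm hke]
    · have hzero : h el - min (s el) (h el) = 0 := by
        rw [min_eq_right (by omega)]; ring
      rw [if_neg (by omega)]
      have hgeq : (keys.map fun k => h k - min (s k) (h k))
          = keys.map (fun k => h k - min ((fun k => if k = el then s k + 1 else s k) k)
              (h k)) := by
        apply List.map_congr_left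
        intro k hk
        beta_reduce
        by_cases hke : k = el
        · subst hke
          rw [if_pos rfl, min_eq_right (by omega), min_eq_right (by omega)]
        · rw [if_neg hke]
      rw [hgeq, ih _ l1 (l2 ++ [el]) hmem']
      have hsplit : twinSplit h s (el :: r)
          = ((twinSplit h (fun k => if k = el then s k + 1 else s k) r).1,
             el :: (twinSplit h (fun k => if k = el then s k + 1 else s k) r).2) := by
        simp [twinSplit, hcase]
      rw [hsplit]
      refine congrArg₂ _ ?_ (by simp)
      apply List.map_congr_left
      intro k hk
      beta_reduce
      by_cases hke : k = el
      · subst hke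
        rw [if_pos rfl, List.count_cons]
        have : (↑(List.count k r + if (k == k) = true then 1 else 0) : Int)
            = ↑(List.count k r) + 1 := by simp
        rw [this]
        have h2 : s k + 1 + (↑(List.count k r) : Int) = s k + (↑(List.count k r) + 1) := by ring
        rw [h2]
      · rw [if_neg hke, List.count_cons]
        simp [Ne.symm hke]

lemma guard_iff (vs : List Int) :
    (vs.any (fun v => decide (PySem.Int.mod v 2 ≠ 0)) = true)
      ↔ (vs.map (fun v => PySem.Int.mod v 2)).sum ≠ 0 := by
  induction vs with
  | nil => simp
  | cons v t ih =>
    have hs : 0 ≤ (t.map (fun v => PySem.Int.mod v 2)).sum :=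
      List.sum_nonneg (by
        intro y hy
        obtain ⟨w, _, rfl⟩ := List.mem_map.mp hy
        exact PySem.Int.mod_nonneg w (by norm_num))
    simp only [List.any_cons, List.map_cons, List.sum_cons, Bool.or_eq_true, decide_eq_true_eq]
    by_cases hv : PySem.Int.mod v 2 = 0
    · rw [hv]
      constructor
      · rintro (hc | hc)
        · exact absurd rfl hc
        · have := ih.mp hc; omega
      · intro hne
        exact Or.inr (ih.mpr (by omega))
    · have h0 : 0 ≤ PySem.Int.mod v 2 := PySem.Int.mod_nonneg v (by norm_num)
      constructor
      · intro _; omega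
      · intro _; exact Or.inl hv

-- which positions are "first half": prefix count below half of the total count
def twinCond (x : List Int) (j : Nat) : Bool :=
  decide ((x.take j).count (x.getD j 0) < x.count (x.getD j 0) / 2)

lemma twinSplit_char (x : List Int) :
    ∀ (rest pre : List Int), x = pre ++ rest →
    twinSplit (fun v => ((x.count v / 2 : Nat) : Int)) (fun k => ((pre.count k : Nat) : Int)) rest
      = (((List.range' pre.length rest.length).filter (twinCond x)).map (fun j => x.getD j 0),
         ((List.range' pre.length rest.length).filter (fun j => ! twinCond x j)).map
            (fun j => x.getD j 0)) := by
  intro rest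
  induction rest with
  | nil => intro pre hx; simp [twinSplit]
  | cons el r ih =>
    intro pre hx
    have hget : x.getD pre.length 0 = el := by
      rw [hx, List.getD_eq_getElem?_getD, List.getElem?_append_right (le_refl _)]
      simp
    have htake : x.take pre.length = pre := by
      rw [hx, List.take_left]
    have hcond : twinCond x pre.length
        = decide (pre.count el < x.count el / 2) := by
      rw [twinCond, hget, htake]
    have hs' : (fun k => if k = el then ((pre.count k : Nat) : Int) + 1
          else ((pre.count k : Nat) : Int))
        = (fun k => (((pre ++ [el]).count k : Nat) : Int)) := by
      funext k
      by_cases hke : k = el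
      · subst hke
        simp [List.count_append]
      · simp [List.count_append, List.count_singleton, hke]
        omega
    have hx' : x = (pre ++ [el]) ++ r := by rw [hx]; simp
    have hrange : List.range' pre.length (r.length + 1)
        = pre.length :: List.range' (pre.length + 1) r.length := List.range'_succ
    have hlen' : (pre ++ [el]).length = pre.length + 1 := by simp
    rw [twinSplit]
    simp only [hs']
    have ihr := ih (pre ++ [el]) hx'
    rw [hlen'] at ihr
    rw [ihr]
    rw [List.length_cons, hrange]
    by_cases hc : pre.count el < x.count el / 2
    · have hlt : ((pre.count el : Nat) : Int) < ((x.count el / 2 : Nat) : Int) := by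
        exact_mod_cast hc
      rw [if_pos hlt]
      have hcT : twinCond x pre.length = true := by rw [hcond]; simpa using hc
      simp [hcT]
      rw [← List.getD_eq_getElem?_getD]; exact hget.symm
    · have hnlt : ¬ ((pre.count el : Nat) : Int) < ((x.count el / 2 : Nat) : Int) := by
        exact_mod_cast hc
      rw [if_neg hnlt]
      have hcF : twinCond x pre.length = false := by rw [hcond]; simpa using hc
      simp [hcF]
      rw [← List.getD_eq_getElem?_getD]; exact hget.symm


lemma take_filter_range (n t : Nat) (P : Nat → Bool) :
    ((List.range n).filter P).take t
      = (List.range n).filter (fun j => P j && decide ((List.range j).countP P < t)) := by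
  induction n with
  | zero => simp
  | succ n ih =>
    rw [List.range_succ, List.filter_append, List.filter_append, List.take_append, ih]
    congr 1
    rw [← List.countP_eq_length_filter]
    by_cases hp : P n
    · by_cases hlt : (List.range n).countP P < t
      · have h1 : List.take (t - (List.range n).countP P) [n] = [n] :=
          List.take_of_length_le (by simp; omega)
        simp [hp, hlt, h1]
      · have h0 : t - (List.range n).countP P = 0 := by omega
        simp [hp, h0, hlt]
    · simp [hp]

lemma drop_filter_range (n t : Nat) (P : Nat → Bool) :
    ((List.range n).filter P).drop t
      = (List.range n).filter (fun j => P j && decide (t ≤ (List.range j).countP P)) := by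
  induction n with
  | zero => simp
  | succ n ih =>
    rw [List.range_succ, List.filter_append, List.filter_append, List.drop_append, ih]
    congr 1
    rw [← List.countP_eq_length_filter]
    by_cases hp : P n
    · by_cases hle : t ≤ (List.range n).countP P
      · have h0 : t - (List.range n).countP P = 0 := by omega
        simp [hp, h0, hle]
      · have h1 : List.drop (t - (List.range n).countP P) [n] = [] :=
          List.drop_of_length_le (by simp; omega)
        simp [hp, hle, h1]
    · simp [hp]

lemma countP_range_getD (x : List Int) (v : Int) :
    ∀ j, j ≤ x.length →
      (List.range j).countP (fun i => x.getD i 0 == v) = (x.take j).count v := by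
  intro j
  induction j with
  | zero => simp
  | succ j ih =>
    intro hj
    have hjl : j < x.length := by omega
    rw [List.range_succ, List.countP_append, ih (by omega), List.take_add_one,
      List.getElem?_eq_getElem hjl, List.count_append]
    simp [List.getD_eq_getElem?_getD, List.getElem?_eq_getElem hjl, List.count_singleton]

lemma sum_map_indicator (keys : List Int) (hnd : keys.Nodup) (w : Int) (c : Nat) :
    (keys.map (fun v => if v = w then c else 0)).sum = if w ∈ keys then c else 0 := by
  induction keys with
  | nil => simp
  | cons a t ih =>
    rcases List.nodup_cons.mp hnd with ⟨ha, ht⟩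
    simp only [List.map_cons, List.sum_cons, ih ht, List.mem_cons]
    by_cases haw : a = w
    · subst haw; simp [ha]
    · simp [haw, Ne.symm haw]

lemma count_filter_eq {α : Type} [DecidableEq α] (l : List α) (p : α → Bool) (a : α) :
    (l.filter p).count a = if p a then l.count a else 0 := by
  by_cases hp : p a
  · rw [List.count_filter (by simpa using hp), if_pos hp]
  · rw [if_neg hp, List.count_eq_zero]
    intro hc
    exact hp (List.of_mem_filter hc)

lemma flatMap_filter_perm (keys : List Int) (hnd : keys.Nodup) (n : Nat)
    (f : Nat → Int) (hf : ∀ j, j < n → f j ∈ keys) (R : Nat → Bool) :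
    (keys.flatMap (fun v => (List.range n).filter (fun j => (f j == v) && R j))).Perm
      ((List.range n).filter R) := by
  rw [List.perm_iff_count]
  intro a
  rw [List.count_flatMap]
  have hcr : (List.range n).count a = if a < n then 1 else 0 := by
    rw [List.Nodup.count (List.nodup_range)]
    simp [List.mem_range]
  have hpiece : ∀ v ∈ keys,
      (List.count a ∘ fun v => (List.range n).filter (fun j => (f j == v) && R j)) v
      = (fun v => if v = f a then (if a < n ∧ R a then 1 else 0) else 0) v := by
    intro v _
    simp only [Function.comp_apply]
    rw [count_filter_eq, hcr]
    by_cases hva : v = f a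
    · subst hva
      by_cases hra : R a
      · simp [hra]
      · simp [hra]
    · have : (f a == v) = false := by simpa using Ne.symm hva
      simp [this, hva]
  rw [List.map_congr_left hpiece, sum_map_indicator keys hnd (f a) _]
  rw [count_filter_eq, hcr]
  by_cases han : a < n
  · rw [if_pos (hf a han)]
    by_cases hra : R a
    · simp [han, hra]
    · simp [han, hra]
  · by_cases hk : f a ∈ keys
    · simp [han, hk]
    · simp [han, hk]

def posOf (x : List Int) (v : Int) : List Int :=
  ((List.range x.length).filter (fun j => x.getD j 0 == v)).map (fun j => ((j : Nat) : Int))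

lemma enumerate_expand (x : List Int) :
    PySem.List.enumerate x = (List.range x.length).map (fun (k : Nat) => ((k : Int), x.getD k 0)) := by
  rw [PySem.List.enumerate_eq_map_pyRange x 0, PySem.List.pyRange_one]
  simp [List.map_map]

lemma pos_getD (x : List Int) (v : Int) :
    ((PySem.List.enumerate x).foldl
      (fun (d : PySem.Dict Int (List Int)) p => d.modify p.2 [] (· ++ [p.1]))
      PySem.Dict.empty).getD v [] = posOf x v := by
  have h1 : (PySem.List.enumerate x).foldl
      (fun (d : PySem.Dict Int (List Int)) p => d.modify p.2 [] (· ++ [p.1]))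
      PySem.Dict.empty
      = ((PySem.List.enumerate x).map Prod.swap).foldl
        (fun (d : PySem.Dict Int (List Int)) q => d.modify q.1 [] (· ++ [q.2]))
        PySem.Dict.empty := by
    rw [List.foldl_map]
    rfl
  rw [h1, PySem.Dict.getD_foldl_modify_append]
  rw [enumerate_expand]
  simp [List.map_map, List.filter_map, posOf, Function.comp_def]

lemma pos_keys (x : List Int) :
    ((PySem.List.enumerate x).foldl
      (fun (d : PySem.Dict Int (List Int)) p => d.modify p.2 [] (· ++ [p.1]))
      PySem.Dict.empty).keys = PySem.Set.ofList x := by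
  rw [PySem.Dict.keys_foldl_modify_key]
  simp [PySem.List.map_snd_enumerate, PySem.Set.update_nil_left]

lemma pos_len (x : List Int) (v : Int) : (posOf x v).length = x.count v := by
  rw [posOf, List.length_map, ← List.countP_eq_length_filter,
    countP_range_getD x v x.length (le_refl _), List.take_length]

lemma piece_take (x : List Int) (v : Int) :
    (posOf x v).take (x.count v / 2)
      = ((List.range x.length).filter
          (fun j => (x.getD j 0 == v) && twinCond x j)).map (fun j => ((j : Nat) : Int)) := by
  rw [posOf, ← List.map_take, take_filter_range]
  congr 1
  apply List.filter_congr
  intro j hj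
  have hjn : j < x.length := List.mem_range.mp hj
  rw [countP_range_getD x v j (le_of_lt hjn)]
  by_cases hgv : x.getD j 0 = v
  · subst hgv
    simp [twinCond]
  · have hb : (x.getD j 0 == v) = false := by simpa using hgv
    rw [List.getD_eq_getElem?_getD] at hb
    simp [hb]

lemma piece_drop (x : List Int) (v : Int) :
    (posOf x v).drop (x.count v / 2)
      = ((List.range x.length).filter
          (fun j => (x.getD j 0 == v) && ! twinCond x j)).map (fun j => ((j : Nat) : Int)) := by
  rw [posOf, ← List.map_drop, drop_filter_range]
  congr 1
  apply List.filter_congr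
  intro j hj
  have hjn : j < x.length := List.mem_range.mp hj
  rw [countP_range_getD x v j (le_of_lt hjn)]
  by_cases hgv : x.getD j 0 = v
  · subst hgv
    simp only [twinCond, beq_self_eq_true, Bool.true_and]
    rw [← decide_not]
    exact decide_eq_decide.mpr Nat.not_lt.symm
  · have hb : (x.getD j 0 == v) = false := by simpa using hgv
    rw [List.getD_eq_getElem?_getD] at hb
    simp [hb]

lemma slice_take_piece (x : List Int) (v : Int) :
    PySem.List.slice (posOf x v) none
        (some (PySem.Int.floordiv (PySem.List.len (posOf x v)) 2))
      = (posOf x v).take (x.count v / 2) := by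
  have hlen : PySem.List.len (posOf x v) = ((x.count v : Nat) : Int) := by
    simp [pos_len]
  have hfd : PySem.Int.floordiv ((x.count v : Nat) : Int) 2 = ((x.count v / 2 : Nat) : Int) := by
    exact_mod_cast PySem.Int.floordiv_natCast (x.count v) 2
  rw [hlen, hfd, PySem.List.slice_to_natCast]

lemma slice_drop_piece (x : List Int) (v : Int) :
    PySem.List.slice (posOf x v)
        (some (PySem.Int.floordiv (PySem.List.len (posOf x v)) 2)) none
      = (posOf x v).drop (x.count v / 2) := by
  have hlen : PySem.List.len (posOf x v) = ((x.count v : Nat) : Int) := by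
    simp [pos_len]
  have hfd : PySem.Int.floordiv ((x.count v : Nat) : Int) 2 = ((x.count v / 2 : Nat) : Int) := by
    exact_mod_cast PySem.Int.floordiv_natCast (x.count v) 2
  rw [hlen, hfd, PySem.List.slice_from_natCast]

-- final comparison: equality of the two mapped lists vs the pointwise zip test on positions
lemma zip_all_eq (x : List Int) :
    ∀ (F S : List Nat), F.length = S.length →
    (∀ j ∈ F, j < x.length) → (∀ j ∈ S, j < x.length) →
    ((F.map (fun j => x.getD j 0) == S.map (fun j => x.getD j 0)) : Bool)
      = (F.zip S).all (fun p => x[p.1]? == x[p.2]?) := by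
  intro F
  induction F with
  | nil =>
    intro S hlen _ _
    have : S = [] := List.length_eq_zero_iff.mp (by simpa using hlen.symm)
    subst this; simp
  | cons a F ih =>
    intro S hlen hF hS
    match S with
    | [] => simp at hlen
    | b :: S =>
      have ha : a < x.length := hF a List.mem_cons_self
      have hb : b < x.length := hS b List.mem_cons_self
      have hF' : ∀ j ∈ F, j < x.length := fun j hj => hF j (List.mem_cons_of_mem _ hj)
      have hS' : ∀ j ∈ S, j < x.length := fun j hj => hS j (List.mem_cons_of_mem _ hj)
      have hlen' : F.length = S.length := by simpa using hlen
      simp only [List.map_cons, List.zip_cons_cons, List.all_cons, List.cons_beq_cons,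
        ih S hlen' hF' hS']
      congr 1
      rw [List.getElem?_eq_getElem ha, List.getElem?_eq_getElem hb]
      simp [List.getD_eq_getElem?_getD, List.getElem?_eq_getElem ha,
        List.getElem?_eq_getElem hb]

lemma is_twin_eq (x : List Int) : is_twin x = is_twin_alt x := by
  unfold is_twin is_twin_alt
  have hndK : (PySem.Set.ofList x).Nodup := PySem.Set.nodup_ofList x
  have hposnd : ((PySem.List.enumerate x).foldl
      (fun (d : PySem.Dict Int (List Int)) p => d.modify p.2 [] (· ++ [p.1]))
      PySem.Dict.empty).keys.Nodup := by
    rw [pos_keys x]; exact hndK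
  have hvalsB : ((PySem.List.enumerate x).foldl
      (fun (d : PySem.Dict Int (List Int)) p => d.modify p.2 [] (· ++ [p.1]))
      PySem.Dict.empty).values = (PySem.Set.ofList x).map (posOf x) := by
    rw [PySem.Dict.values_eq_map_keys _ hposnd [], pos_keys x]
    exact List.map_congr_left (fun v _ => pos_getD x v)
  have hndC : (PySem.Dict.counter x (κ := Int)).keys.Nodup := PySem.Dict.nodup_keys_counter x
  have hvalsA : (PySem.Dict.counter x (κ := Int)).values
      = (PySem.Set.ofList x).map (fun v => ((x.count v : Nat) : Int)) := by
    rw [PySem.Dict.values_eq_map_keys _ hndC 0, PySem.Dict.keys_counter]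
    exact List.map_congr_left (fun v _ => PySem.Dict.getD_counter x v)
  have hguard : (((PySem.List.enumerate x).foldl
        (fun (d : PySem.Dict Int (List Int)) p => d.modify p.2 [] (· ++ [p.1]))
        PySem.Dict.empty).values.any
          (fun p => decide (PySem.Int.mod (PySem.List.len p) 2 ≠ 0)) = true)
      ↔ ((PySem.Dict.counter x (κ := Int)).values.map (fun v => PySem.Int.mod v 2)).sum ≠ 0 := by
    rw [← guard_iff, hvalsA, hvalsB, List.any_map, List.any_map]
    have hpt : ∀ v ∈ PySem.Set.ofList x,
        ((fun p => decide (PySem.Int.mod (PySem.List.len p) 2 ≠ 0)) ∘ posOf x) v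
        = ((fun v => decide (PySem.Int.mod v 2 ≠ 0)) ∘ (fun v => ((x.count v : Nat) : Int))) v := by
      intro v _
      simp [pos_len]
    rw [PySem.List.any_congr_mem hpt]
  by_cases hg : ((PySem.Dict.counter x (κ := Int)).values.map (fun v => PySem.Int.mod v 2)).sum ≠ 0
  · rw [if_pos hg, if_pos (hguard.mpr hg)]
  · rw [if_neg hg, if_neg (fun hc => hg (hguard.mp hc))]
    dsimp only
    have heven : ∀ v ∈ x, x.count v % 2 = 0 := by
      intro v hv
      have hmem : ((x.count v : Nat) : Int) ∈ (PySem.Dict.counter x (κ := Int)).values := by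
        rw [hvalsA]
        exact List.mem_map.mpr ⟨v, (PySem.Set.mem_ofList x v).mpr hv, rfl⟩
      have hfalse : ((PySem.Dict.counter x (κ := Int)).values.any
          (fun v => decide (PySem.Int.mod v 2 ≠ 0))) = false := by
        rw [Bool.eq_false_iff]
        exact fun hc => hg ((guard_iff _).mp hc)
      have h0 : PySem.Int.mod ((x.count v : Nat) : Int) 2 = 0 := by
        have := List.any_eq_false.mp hfalse _ hmem
        simpa using this
      have h1 : PySem.Int.mod ((x.count v : Nat) : Int) 2 = ((x.count v % 2 : Nat) : Int) := by
        exact_mod_cast PySem.Int.mod_natCast (x.count v) 2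
      rw [h1] at h0
      exact_mod_cast h0
    -- ===== A side: reduce the fold to the split lists =====
    have hmemk : ∀ el ∈ x, el ∈ (PySem.Dict.counter x (κ := Int)).keys := by
      intro el he
      rw [PySem.Dict.keys_counter]
      exact (PySem.Set.mem_ofList x el).mpr he
    have hh : ∀ k : Int, 0 ≤ PySem.Int.floordiv ((x.count k : Nat) : Int) 2 := by
      intro k
      rw [PySem.Int.floordiv_eq_ediv_of_pos (by norm_num)]
      exact Int.ediv_nonneg (Int.natCast_nonneg _) (by norm_num)
    have hc0 : (PySem.Dict.counter x (κ := Int)).values.map (fun v => PySem.Int.floordiv v 2)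
        = (PySem.Dict.counter x (κ := Int)).keys.map
            (fun k => PySem.Int.floordiv ((x.count k : Nat) : Int) 2) := by
      rw [PySem.Dict.values_eq_map_keys _ hndC 0, List.map_map]
      apply List.map_congr_left
      intro k _
      simp [PySem.Dict.getD_counter]
    rw [hc0]
    have hinit : (PySem.Dict.counter x (κ := Int)).keys.map
          (fun k => PySem.Int.floordiv ((x.count k : Nat) : Int) 2)
        = (PySem.Dict.counter x (κ := Int)).keys.map
            (fun k => PySem.Int.floordiv ((x.count k : Nat) : Int) 2
              - min 0 (PySem.Int.floordiv ((x.count k : Nat) : Int) 2)) := by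
      apply List.map_congr_left
      intro k _
      rw [min_eq_left (hh k)]
      ring
    rw [hinit]
    rw [foldA _ hndC (fun k => PySem.Int.floordiv ((x.count k : Nat) : Int) 2) x
      (fun _ => 0) [] [] hmemk]
    have hfun : (fun k => PySem.Int.floordiv ((x.count k : Nat) : Int) 2)
        = (fun v => ((x.count v / 2 : Nat) : Int)) := by
      funext k
      exact_mod_cast PySem.Int.floordiv_natCast (x.count k) 2
    have hs0 : (fun _ => (0 : Int)) = (fun k => ((([] : List Int).count k : Nat) : Int)) := by
      funext k; simp
    rw [hfun, hs0, twinSplit_char x x [] (by simp)]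
    have hrange0 : List.range' ([] : List Int).length x.length = List.range x.length := by
      rw [List.length_nil, ← List.range_eq_range']
    rw [hrange0]
    simp only [List.nil_append]
    -- ===== B side: reduce slices+sort to the same filtered ranges =====
    rw [hvalsB, List.flatMap_map, List.flatMap_map]
    have hpc1 : (fun v => PySem.List.slice (posOf x v) none
            (some (PySem.Int.floordiv (PySem.List.len (posOf x v)) 2)))
        = (fun v => ((List.range x.length).filter
            (fun j => (x.getD j 0 == v) && twinCond x j)).map (fun j => ((j : Nat) : Int))) := by
      funext v
      rw [slice_take_piece, piece_take]
    have hpc2 : (fun v => PySem.List.slice (posOf x v)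
            (some (PySem.Int.floordiv (PySem.List.len (posOf x v)) 2)) none)
        = (fun v => ((List.range x.length).filter
            (fun j => (x.getD j 0 == v) && ! twinCond x j)).map (fun j => ((j : Nat) : Int))) := by
      funext v
      rw [slice_drop_piece, piece_drop]
    rw [hpc1, hpc2, ← List.map_flatMap, ← List.map_flatMap]
    have hfK : ∀ j, j < x.length → x.getD j 0 ∈ PySem.Set.ofList x := by
      intro j hj
      refine (PySem.Set.mem_ofList x _).mpr ?_
      rw [List.getD_eq_getElem?_getD, List.getElem?_eq_getElem hj]
      exact List.getElem_mem hj
    have hperm1 := flatMap_filter_perm (PySem.Set.ofList x) hndK x.length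
      (fun j => x.getD j 0) hfK (twinCond x)
    have hperm2 := flatMap_filter_perm (PySem.Set.ofList x) hndK x.length
      (fun j => x.getD j 0) hfK (fun j => ! twinCond x j)
    have hpairF : (((List.range x.length).filter (twinCond x)).map
        (fun j => ((j : Nat) : Int))).Pairwise (fun a b => a < b) := by
      rw [List.pairwise_map]
      exact ((List.pairwise_lt_range).sublist List.filter_sublist).imp
        (fun h => by exact_mod_cast h)
    have hpairS : (((List.range x.length).filter (fun j => ! twinCond x j)).map
        (fun j => ((j : Nat) : Int))).Pairwise (fun a b => a < b) := by
      rw [List.pairwise_map]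
      exact ((List.pairwise_lt_range).sublist List.filter_sublist).imp
        (fun h => by exact_mod_cast h)
    rw [PySem.List.sorted_eq_of_perm_of_pairwise_lt _ _ (fun i => i)
        ((hperm1.map (fun j => ((j : Nat) : Int))).symm) hpairF,
      PySem.List.sorted_eq_of_perm_of_pairwise_lt _ _ (fun i => i)
        ((hperm2.map (fun j => ((j : Nat) : Int))).symm) hpairS]
    have hlenp1 : ∀ v : Int, ((List.range x.length).filter
        (fun j => (x.getD j 0 == v) && twinCond x j)).length = x.count v / 2 := by
      intro v
      have h := congrArg List.length (piece_take x v)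
      rw [List.length_map, List.length_take, pos_len] at h
      rw [← h, min_eq_left (Nat.div_le_self _ _)]
    have hlenp2 : ∀ v : Int, ((List.range x.length).filter
        (fun j => (x.getD j 0 == v) && ! twinCond x j)).length
        = x.count v - x.count v / 2 := by
      intro v
      have h := congrArg List.length (piece_drop x v)
      rw [List.length_map, List.length_drop, pos_len] at h
      rw [← h]
    have hlens : ((List.range x.length).filter (twinCond x)).length
        = ((List.range x.length).filter (fun j => ! twinCond x j)).length := by
      rw [← hperm1.length_eq, ← hperm2.length_eq, List.length_flatMap, List.length_flatMap]
      apply congrArg List.sum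
      apply List.map_congr_left
      intro v hv
      have hvx : v ∈ x := (PySem.Set.mem_ofList x v).mp hv
      rw [hlenp1 v, hlenp2 v]
      have := heven v hvx
      omega
    have hbF : ∀ j ∈ (List.range x.length).filter (twinCond x), j < x.length :=
      fun j hj => List.mem_range.mp (List.mem_filter.mp hj).1
    have hbS : ∀ j ∈ (List.range x.length).filter (fun j => ! twinCond x j), j < x.length :=
      fun j hj => List.mem_range.mp (List.mem_filter.mp hj).1
    rw [List.zip_map, List.all_map]
    have hcomp : ((fun q : Int × Int => PySem.List.pyGet? x q.1 == PySem.List.pyGet? x q.2)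
          ∘ Prod.map (fun j : Nat => ((j : Nat) : Int)) (fun j : Nat => ((j : Nat) : Int)))
        = (fun p : Nat × Nat => x[p.1]? == x[p.2]?) := by
      funext p
      simp [Prod.map]
    rw [hcomp, ← zip_all_eq x _ _ hlens hbF hbS]


-- ===== VERDICT (by name: the statement is the Claim_ definition above) =====
theorem is_twin_spec : Claim_equal_is_twin := by
  intro x _
  unfold Spec_is_twin
  exact is_twin_eq x
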